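-- pv_equiv track=rewrite | github.com/Lornamokam/Board-Game | connect4.py | verify_board
-- ===== SOURCE A (Python) =====
-- def verify_board (board):
--     nrows = len(board)
--     ncols = len (board [0])
--     numX = 0
--     numC = 0
--     for r in range(nrows):
--         for c in range(ncols):
--             if board [r][c] == "X":
--                 numX += 1
--             elif board [r][c] == "O":
--                 numC += 1
--     if numX - numC < 0:
--         if numC -numX > 1:
--             return False
--     else:
--         if numX - numC > 1:
--             return False
--     for r in range(nrows-1):
--         for c in range(ncols):
--             if board [r][c] != ".":
--                 if board[r+1][c] == ".":
--                     return False
--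
--     return True
-- ===== SOURCE B (Python) =====
-- def verify_board(board):
--     # Note: equivalence is about the return value; neither version mutates its argument.
--     ncols = len(board[0])
--     cols = [[row[c] for row in board] for c in range(ncols)]
--     flat = [cell for col in cols for cell in col]
--     if abs(flat.count("X") - flat.count("O")) > 1:
--         return False
--     for col in cols:
--         pieces = [cell for cell in col if cell != "."]
--         if col != ["."] * (len(col) - len(pieces)) + pieces:
--             return False
--     return True
-- ===== Notes on version B (the rewrite author's own statement) =====
-- stated objective: alternative
-- what changed: B explicitly builds the transposed column lists, counts pieces on the flattened columns with one abs-difference test, and checks gravity by reconstructing each settled column (filter out the pieces and pad with dots on top) and comparing it for equality with the original column, instead of A's row-major adjacent-pair violation scan.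
import Mathlib
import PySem

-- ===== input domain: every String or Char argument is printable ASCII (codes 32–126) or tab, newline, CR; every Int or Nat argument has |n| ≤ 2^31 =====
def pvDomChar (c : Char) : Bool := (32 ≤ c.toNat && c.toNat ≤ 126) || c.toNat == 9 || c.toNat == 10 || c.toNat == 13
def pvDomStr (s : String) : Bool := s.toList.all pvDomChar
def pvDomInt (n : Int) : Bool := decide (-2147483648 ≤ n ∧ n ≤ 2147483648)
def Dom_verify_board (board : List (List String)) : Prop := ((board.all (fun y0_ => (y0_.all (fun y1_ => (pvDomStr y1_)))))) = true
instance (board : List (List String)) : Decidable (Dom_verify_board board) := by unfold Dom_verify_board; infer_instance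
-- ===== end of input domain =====

-- B validates the same board differently: it builds the transposed column lists, counts pieces on
-- the flattened columns with one abs-difference test, and checks gravity by reconstructing each
-- settled column (pieces filtered out, dots padded on top) and comparing it with the original.

-- ===== PORT A =====
-- gravity part of A: the two nested loops after the count test (early 'return False' = .all)
def vbGrav (board : List (List String)) (nrows ncols : Int) : Bool :=
  (PySem.List.pyRange 0 (nrows - 1)).all (fun r =>
    (PySem.List.pyRange 0 ncols).all (fun c =>
      if PySem.List.pyGetD (PySem.List.pyGetD board r []) c "" ≠ "." then
        if PySem.List.pyGetD (PySem.List.pyGetD board (r + 1) []) c "" = "." then false else true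
      else true))

def verify_board (board : List (List String)) : Bool :=
  let nrows : Int := board.length
  -- board[0] raises IndexError on []; board[r][c] raises on a row shorter than ncols — excluded by Pre_
  let ncols : Int := (PySem.List.pyGetD board 0 []).length
  let counts : Int × Int :=
    (PySem.List.pyRange 0 nrows).foldl (fun (acc : Int × Int) r =>
      (PySem.List.pyRange 0 ncols).foldl (fun (acc : Int × Int) c =>
        if PySem.List.pyGetD (PySem.List.pyGetD board r []) c "" = "X" then (acc.1 + 1, acc.2)
        else if PySem.List.pyGetD (PySem.List.pyGetD board r []) c "" = "O" then (acc.1, acc.2 + 1)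
        else acc) acc) ((0 : Int), (0 : Int))
  if counts.1 - counts.2 < 0 then
    if counts.2 - counts.1 > 1 then false else vbGrav board nrows ncols
  else
    if counts.1 - counts.2 > 1 then false else vbGrav board nrows ncols

-- ===== PORT B =====
-- the settled version of one column: its pieces pushed to the bottom, dots padded on top
def vbSettle (col : List String) : List String :=
  List.replicate (col.length - (col.filter (fun cell => cell ≠ ".")).length) "."
    ++ col.filter (fun cell => cell ≠ ".")

def verify_board_alt (board : List (List String)) : Bool :=
  let ncols := (board.headD []).length
  -- row[c] is in range under Pre_ (c < ncols ≤ row.length), so getD is exact there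
  let cols := (List.range ncols).map (fun c => board.map (fun row => row.getD c ""))
  let flat := cols.flatten
  if 1 < ((flat.count "X" : Int) - (flat.count "O" : Int)).natAbs then false
  else cols.all (fun col => col == vbSettle col)

-- ===== PRECONDITION & SPEC =====
-- Pre_ excludes exactly the inputs on which A raises IndexError: the empty board (board[0])
-- and boards with some row shorter than the first row (board[r][c] for c < ncols).
def Pre_verify_board (board : List (List String)) : Prop :=
  board ≠ [] ∧ ∀ row ∈ board, (board.headD []).length ≤ row.length
instance (board : List (List String)) : Decidable (Pre_verify_board board) := by
  unfold Pre_verify_board; infer_instance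

def pvWitness_verify_board : List (List String) := [[".", "."], ["X", "O"]]

def Spec_verify_board (board : List (List String)) (out : Bool) : Prop := out = verify_board_alt board
instance (board : List (List String)) (out : Bool) : Decidable (Spec_verify_board board out) := by
  unfold Spec_verify_board; infer_instance

-- ===== CLAIM (what is proved, stated in full; the proofs are below) =====
def Claim_equal_verify_board : Prop := ∀ (board : List (List String)), Dom_verify_board board → Pre_verify_board board → Spec_verify_board board (verify_board board)

-- ===== LEMMAS AND PROOFS =====

-- the cell at row i, column c, as A's gravity check sees it
def vbCell (board : List (List String)) (i c : Nat) : String := (board.getD i []).getD c ""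

-- the column list B builds for column c
def vbCol (board : List (List String)) (c : Nat) : List String :=
  board.map (fun row => row.getD c "")

-- the gravity property both checks decide: below a piece there is never a hole
def GravProp (board : List (List String)) (n : Nat) : Prop :=
  ∀ c < n, ∀ i, i + 1 < board.length → vbCell board i c ≠ "." → vbCell board (i + 1) c ≠ "."

theorem vb_getD_zero (board : List (List String)) :
    PySem.List.pyGetD board 0 [] = board.headD [] := by
  cases board <;> simp [PySem.List.pyGetD_zero]

-- ---------- counting ----------

-- one row of A's counting loop is a fold over the first ncols cells
theorem vb_count_row (row : List String) (ncols : Nat) (h : ncols ≤ row.length) (acc : Int × Int) :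
    (PySem.List.pyRange 0 (ncols : Int)).foldl (fun (acc : Int × Int) c =>
        if PySem.List.pyGetD row c "" = "X" then (acc.1 + 1, acc.2)
        else if PySem.List.pyGetD row c "" = "O" then (acc.1, acc.2 + 1)
        else acc) acc
      = (row.take ncols).foldl (fun (acc : Int × Int) cell =>
        if cell = "X" then (acc.1 + 1, acc.2)
        else if cell = "O" then (acc.1, acc.2 + 1)
        else acc) acc := by
  have hlen : (row.take ncols).length = ncols := by simp [h]
  have hcast : (ncols : Int) = ((row.take ncols).length : Int) := by rw [hlen]
  rw [hcast]
  rw [← PySem.List.foldl_pyRange_zero_pyGetD' (row.take ncols) ""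
        (fun (acc : Int × Int) cell =>
          if cell = "X" then (acc.1 + 1, acc.2)
          else if cell = "O" then (acc.1, acc.2 + 1)
          else acc) acc]
  apply PySem.List.foldl_congr_mem
  intro a c hc
  rw [PySem.List.mem_pyRange_one] at hc
  have hcell : PySem.List.pyGetD row c "" = PySem.List.pyGetD (row.take ncols) c "" := by
    rw [PySem.List.pyGetD_eq_getElem row "" hc.1 (by omega),
        PySem.List.pyGetD_eq_getElem (row.take ncols) "" hc.1 (by omega)]
    rw [List.getElem_take]
  rw [hcell]

-- a fold counting "X"/"O" cells is the pair of counts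
theorem vb_count_fold (l : List String) (a b : Int) :
    l.foldl (fun (acc : Int × Int) cell =>
        if cell = "X" then (acc.1 + 1, acc.2)
        else if cell = "O" then (acc.1, acc.2 + 1)
        else acc) (a, b)
      = (a + (l.count "X" : Int), b + (l.count "O" : Int)) := by
  induction l generalizing a b with
  | nil => simp
  | cons x t ih =>
    by_cases hX : x = "X"
    · simp [hX, List.foldl_cons, ih, Prod.ext_iff]; omega
    · by_cases hO : x = "O"
      · simp [hO, List.foldl_cons, ih, Prod.ext_iff]; omega
      · simp [hX, hO, List.foldl_cons, ih]

theorem vb_sum_fold (board : List (List String)) (ncols : Nat) (a b : Int) :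
    board.foldl (fun (acc : Int × Int) row =>
        (row.take ncols).foldl (fun (acc : Int × Int) cell =>
          if cell = "X" then (acc.1 + 1, acc.2)
          else if cell = "O" then (acc.1, acc.2 + 1)
          else acc) acc) (a, b)
      = (a + ((board.map (fun row => (row.take ncols).count "X")).sum : Int),
         b + ((board.map (fun row => (row.take ncols).count "O")).sum : Int)) := by
  induction board generalizing a b with
  | nil => simp
  | cons row t ih =>
    rw [List.foldl_cons, vb_count_fold, ih]
    simp [Prod.ext_iff]
    constructor <;> ring

-- A's whole counting loop equals the row-wise count sums (under Pre_'s row-length bound)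
theorem vb_count_eq (board : List (List String)) (ncols : Nat)
    (h : ∀ row ∈ board, ncols ≤ row.length) :
    (PySem.List.pyRange 0 (board.length : Int)).foldl (fun (acc : Int × Int) r =>
      (PySem.List.pyRange 0 (ncols : Int)).foldl (fun (acc : Int × Int) c =>
        if PySem.List.pyGetD (PySem.List.pyGetD board r []) c "" = "X" then (acc.1 + 1, acc.2)
        else if PySem.List.pyGetD (PySem.List.pyGetD board r []) c "" = "O" then (acc.1, acc.2 + 1)
        else acc) acc) ((0 : Int), (0 : Int))
      = (((board.map (fun row => (row.take ncols).count "X")).sum : Int),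
         ((board.map (fun row => (row.take ncols).count "O")).sum : Int)) := by
  have h1 := PySem.List.foldl_pyRange_zero_pyGetD' board []
    (fun (acc : Int × Int) row =>
      (PySem.List.pyRange 0 (ncols : Int)).foldl (fun (acc : Int × Int) c =>
        if PySem.List.pyGetD row c "" = "X" then (acc.1 + 1, acc.2)
        else if PySem.List.pyGetD row c "" = "O" then (acc.1, acc.2 + 1)
        else acc) acc) ((0 : Int), (0 : Int))
  rw [h1]
  rw [PySem.List.foldl_congr_mem board _
        (fun (acc : Int × Int) row =>
          (row.take ncols).foldl (fun (acc : Int × Int) cell =>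
            if cell = "X" then (acc.1 + 1, acc.2)
            else if cell = "O" then (acc.1, acc.2 + 1)
            else acc) acc) _
        (fun acc row hrow => vb_count_row row ncols (h row hrow) acc)]
  rw [vb_sum_fold]
  simp

-- counting the first n cells of a row by index
theorem vb_row_index_count (row : List String) (v : String) (n : Nat) (h : n ≤ row.length) :
    ((List.range n).map (fun c => if row.getD c "" = v then 1 else 0)).sum
      = (row.take n).count v := by
  induction n with
  | zero => simp
  | succ m ih =>
    have hm : m ≤ row.length := by omega
    rw [List.range_succ, List.map_append, List.sum_append, ih hm]
    have htake : row.take (m + 1) = row.take m ++ [row[m]] := by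
      rw [List.take_add_one]
      simp [List.getElem?_eq_getElem (by omega : m < row.length)]
    rw [htake, List.count_append]
    have hm2 : row[m]? = some row[m] := List.getElem?_eq_getElem (by omega)
    by_cases hv : row[m] = v <;> simp [hm2, hv]

-- transposing: the column counts of the first n columns sum to the row counts
theorem vb_transpose_count (board : List (List String)) (n : Nat) (v : String)
    (h : ∀ row ∈ board, n ≤ row.length) :
    ((List.range n).map (fun c => (vbCol board c).count v)).sum
      = (board.map (fun row => (row.take n).count v)).sum := by
  induction board with
  | nil => simp [vbCol]
  | cons row t ih =>
    have hrow : n ≤ row.length := h row (by simp)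
    have hcons : ∀ c, (vbCol (row :: t) c).count v
        = (if row.getD c "" = v then 1 else 0) + (vbCol t c).count v := by
      intro c
      simp only [vbCol, List.map_cons, List.count_cons]
      simp only [List.getD_eq_getElem?_getD, beq_iff_eq]
      omega
    calc ((List.range n).map (fun c => (vbCol (row :: t) c).count v)).sum
        = ((List.range n).map (fun c =>
            (if row.getD c "" = v then 1 else 0) + (vbCol t c).count v)).sum := by
          simp only [hcons]
      _ = ((List.range n).map (fun c => if row.getD c "" = v then 1 else 0)).sum
            + ((List.range n).map (fun c => (vbCol t c).count v)).sum := List.sum_map_add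
      _ = (row.take n).count v + (t.map (fun r => (r.take n).count v)).sum := by
          rw [vb_row_index_count row v n hrow, ih (fun r hr => h r (by simp [hr]))]
      _ = ((row :: t).map (fun r => (r.take n).count v)).sum := by simp

-- B's flattened count equals the row-wise count sums
theorem vb_flat_count (board : List (List String)) (n : Nat) (v : String)
    (h : ∀ row ∈ board, n ≤ row.length) :
    (((List.range n).map (fun c => board.map (fun row => row.getD c ""))).flatten.count v)
      = (board.map (fun row => (row.take n).count v)).sum := by
  rw [List.count_flatten, List.map_map]
  exact vb_transpose_count board n v h

-- ---------- gravity ----------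

-- the adjacency property of one column list
def ColAdj (l : List String) : Prop :=
  ∀ i, i + 1 < l.length → l.getD i "" ≠ "." → l.getD (i + 1) "" ≠ "."

-- a column starting with a piece is settled iff every later cell is a piece
theorem vb_adj_cons_ne (x : String) (t : List String) (hx : x ≠ ".") :
    ColAdj (x :: t) ↔ ∀ y ∈ t, y ≠ "." := by
  constructor
  · intro hadj y hy
    obtain ⟨j, hj, rfl⟩ := List.getElem_of_mem hy
    have hgen : ∀ j, j < t.length → t.getD j "" ≠ "." := by
      intro j
      induction j with
      | zero =>
        intro hj0
        have := hadj 0 (by simpa using hj0) (by simpa using hx)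
        simpa using this
      | succ k ihk =>
        intro hk
        have hprev := ihk (by omega)
        have := hadj (k + 1) (by simpa using hk) (by simpa using hprev)
        simpa using this
    have := hgen j hj
    rwa [List.getD_eq_getElem t "" hj] at this
  · intro hall i hi _
    have hmem : (x :: t).getD (i + 1) "" ∈ t := by
      have hlt : i < t.length := by simpa using hi
      simp only [List.getD_cons_succ]
      rw [List.getD_eq_getElem t "" hlt]
      exact List.getElem_mem hlt
    exact hall _ hmem

theorem vb_adj_cons_dot (t : List String) : ColAdj ("." :: t) ↔ ColAdj t := by
  constructor
  · intro hadj i hi hne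
    have := hadj (i + 1) (by simpa using hi) (by simpa using hne)
    simpa using this
  · intro hadj i hi
    cases i with
    | zero => intro h0; simp at h0
    | succ k =>
      intro hne
      have := hadj k (by simpa using hi) (by simpa using hne)
      simpa using this

-- the reconstruction test decides exactly the adjacency property
theorem vb_settle_iff (l : List String) : l = vbSettle l ↔ ColAdj l := by
  induction l with
  | nil => simp [vbSettle, ColAdj]
  | cons x t ih =>
    by_cases hx : x = "."
    · subst hx
      have hfil : ("." :: t).filter (fun cell => cell ≠ ".") = t.filter (fun cell => cell ≠ ".") := by
        simp
      have hle := List.length_filter_le (fun cell => cell ≠ ".") t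
      have hlen : ("." :: t).length - (t.filter (fun cell => cell ≠ ".")).length
          = (t.length - (t.filter (fun cell => cell ≠ ".")).length) + 1 := by
        simp only [List.length_cons]; omega
      have hset : vbSettle ("." :: t) = "." :: vbSettle t := by
        rw [vbSettle, hfil, hlen, List.replicate_succ, List.cons_append, vbSettle]
      rw [hset, vb_adj_cons_dot, ← ih]
      constructor
      · intro h; exact (List.cons.injEq _ _ _ _).mp h |>.2
      · intro h; rw [← h]
    · have hfil : (x :: t).filter (fun cell => cell ≠ ".") = x :: t.filter (fun cell => cell ≠ ".") := by
        simp [hx]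
      rw [vb_adj_cons_ne x t hx]
      constructor
      · intro heq
        set k := (x :: t).length - ((x :: t).filter (fun cell => cell ≠ ".")).length with hk
        cases hkc : k with
        | zero =>
          have hlenf : ((x :: t).filter (fun cell => cell ≠ ".")).length = (x :: t).length := by
            have hle := List.length_filter_le (fun cell => cell ≠ ".") (x :: t)
            omega
          have hall := List.length_filter_eq_length_iff.mp hlenf
          intro y hy
          have := hall y (by simp [hy])
          simpa using this
        | succ m =>
          exfalso
          rw [vbSettle, ← hk, hkc, List.replicate_succ, List.cons_append] at heq
          have : x = "." := (List.cons.injEq _ _ _ _).mp heq |>.1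
          exact hx this
      · intro hall
        have hfid : t.filter (fun cell => cell ≠ ".") = t :=
          List.filter_eq_self.mpr (fun a ha => by simpa using hall a ha)
        rw [vbSettle, hfil, hfid]
        simp
  
-- B's column list getD agrees with A's cell view on every index
theorem vb_col_getD (board : List (List String)) (c j : Nat) :
    (vbCol board c).getD j "" = vbCell board j c := by
  by_cases hj : j < board.length
  · rw [vbCol, vbCell]
    rw [List.getD_eq_getElem _ "" (by simpa using hj), List.getElem_map,
        List.getD_eq_getElem board [] hj]
  · rw [vbCol, vbCell]
    rw [List.getD_eq_default _ "" (by simpa using hj),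
        List.getD_eq_default board [] (by omega)]
    simp

theorem vb_cell_cast (board : List (List String)) (i c : Nat) :
    PySem.List.pyGetD (PySem.List.pyGetD board (i : Int) []) (c : Int) "" = vbCell board i c := by
  rw [PySem.List.pyGetD_natCast, PySem.List.pyGetD_natCast, vbCell]

theorem vb_cell_cast_succ (board : List (List String)) (i c : Nat) :
    PySem.List.pyGetD (PySem.List.pyGetD board ((i : Int) + 1) []) (c : Int) "" = vbCell board (i + 1) c := by
  rw [show ((i : Int) + 1) = ((i + 1 : Nat) : Int) by push_cast; ring]
  exact vb_cell_cast board (i + 1) c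

theorem vb_gravA_iff (board : List (List String)) (n : Nat) :
    vbGrav board (board.length : Int) (n : Int) = true ↔ GravProp board n := by
  unfold vbGrav GravProp
  simp only [List.all_eq_true, PySem.List.mem_pyRange_one]
  constructor
  · intro hall c hc i hi hne
    have h := hall (i : Int) ⟨by omega, by omega⟩ (c : Int) ⟨by omega, by omega⟩
    rw [vb_cell_cast, vb_cell_cast_succ] at h
    rw [if_pos hne] at h
    intro hdot
    rw [if_pos hdot] at h
    cases h
  · intro hp r hr c hc
    obtain ⟨i, rfl⟩ := Int.eq_ofNat_of_zero_le hr.1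
    obtain ⟨k, rfl⟩ := Int.eq_ofNat_of_zero_le hc.1
    rw [vb_cell_cast, vb_cell_cast_succ]
    by_cases hne : vbCell board i k ≠ "."
    · rw [if_pos hne]
      have := hp k (by omega) i (by omega) hne
      rw [if_neg this]
    · rw [if_neg hne]

theorem vb_gravB_iff (board : List (List String)) (n : Nat) :
    ((List.range n).map (fun c => board.map (fun row => row.getD c ""))).all
        (fun col => col == vbSettle col) = true ↔ GravProp board n := by
  rw [List.all_map]
  simp only [List.all_eq_true, List.mem_range, Function.comp]
  have hstep : ∀ c, ((board.map (fun row => row.getD c "") == vbSettle (board.map (fun row => row.getD c ""))) = true)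
      ↔ ColAdj (vbCol board c) := by
    intro c
    rw [beq_iff_eq]
    exact (show (vbCol board c = vbSettle (vbCol board c)) ↔ _ from vb_settle_iff _)
  constructor
  · intro hall c hc i hi hne
    have hadj := (hstep c).mp (hall c hc)
    have hlen : (vbCol board c).length = board.length := by simp [vbCol]
    have := hadj i (by omega) (by rwa [vb_col_getD])
    rwa [vb_col_getD] at this
  · intro hp c hc
    apply (hstep c).mpr
    intro i hi hne
    have hlen : (vbCol board c).length = board.length := by simp [vbCol]
    rw [vb_col_getD] at hne ⊢
    exact hp c hc i (by omega) hne

theorem vb_grav_eq (board : List (List String)) (n : Nat) :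
    vbGrav board (board.length : Int) (n : Int)
      = ((List.range n).map (fun c => board.map (fun row => row.getD c ""))).all
          (fun col => col == vbSettle col) := by
  rw [Bool.eq_iff_iff, vb_gravA_iff, vb_gravB_iff]

-- ===== VERDICT (by name: the statement is the Claim_ definition above) =====
theorem verify_board_spec : Claim_equal_verify_board := by
  intro board _ hpre
  obtain ⟨hne, hrow⟩ := hpre
  show verify_board board = verify_board_alt board
  simp only [verify_board, verify_board_alt]
  rw [vb_getD_zero]
  rw [vb_count_eq board _ hrow, vb_grav_eq]
  rw [vb_flat_count board _ "X" hrow, vb_flat_count board _ "O" hrow]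
  push_cast
  simp only [List.map_map, Function.comp_def]
  split_ifs <;> first | rfl | omega
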